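-- pv_equiv track=rewrite | github.com/umairjavaid/FlutterSwarm_original | python-backend/src/core/tools/file_system_tool.py | _optimize_imports
-- ===== SOURCE A (Python) =====
-- def _optimize_imports(content: str) -> str:
--     """Optimize Dart import statements following Flutter conventions."""
--     lines = content.split('\n')
--     import_lines = []
--     other_lines = []
--
--     # Separate import lines from other content
--     for line in lines:
--         if line.strip().startswith('import '):
--             import_lines.append(line.strip())
--         else:
--             other_lines.append(line)
--
--     if not import_lines:
--         return content
--
--     # Categorize imports
--     dart_imports = []
--     package_imports = []
--     relative_imports = []
--
--     for import_line in import_lines: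
--         if 'dart:' in import_line:
--             dart_imports.append(import_line)
--         elif 'package:' in import_line:
--             package_imports.append(import_line)
--         else:
--             relative_imports.append(import_line)
--
--     # Sort each category
--     dart_imports.sort()
--     package_imports.sort()
--     relative_imports.sort()
--
--     # Rebuild content with organized imports
--     organized_imports = []
--
--     # Add dart: imports first
--     if dart_imports:
--         organized_imports.extend(dart_imports)
--         organized_imports.append('')  # Empty line after dart imports
--
--     # Add package: imports
--     if package_imports:
--         organized_imports.extend(package_imports)
--         organized_imports.append('')  # Empty line after package imports
--
--     # Add relative imports last
--     if relative_imports: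
--         organized_imports.extend(relative_imports)
--         organized_imports.append('')  # Empty line after relative imports
--
--     # Find where imports end in original content
--     non_import_start = 0
--     for i, line in enumerate(other_lines):
--         if line.strip() and not line.strip().startswith('//') and not line.strip().startswith('/*'):
--             non_import_start = i
--             break
--
--     # Combine organized imports with rest of content
--     result_lines = organized_imports + other_lines[non_import_start:]
--
--     return '\n'.join(result_lines)
-- ===== SOURCE B (Python) =====
-- def _optimize_imports(content: str) -> str:
--     """Optimize Dart import statements following Flutter conventions."""
--     # Three buckets (dart:, package:, relative), each KEPT SORTED at all times:
--     # a single pass over the lines inserts every import into sorted position,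
--     # so there is no separate categorize stage and no batch sort.
--     buckets = ([], [], [])
--     rest = []
--
--     for line in content.split('\n'):
--         s = line.strip()
--         if s.startswith('import '):
--             bucket = buckets[0] if 'dart:' in s else buckets[1] if 'package:' in s else buckets[2]
--             # online insertion: place s before the first strictly greater entry
--             for i, x in enumerate(bucket):
--                 if s < x:
--                     bucket.insert(i, s)
--                     break
--             else:
--                 bucket.append(s)
--         else:
--             rest.append(line)
--
--     if not any(buckets):
--         return content
--
--     organized = []
--     for bucket in buckets:
--         if bucket:
--             organized += bucket
--             organized.append('')
--
--     start = next((i for i, line in enumerate(rest)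
--                   if line.strip() and not line.strip().startswith(('//', '/*'))), 0)
--     return '\n'.join(organized + rest[start:])
-- ===== Notes on version B (the rewrite author's own statement) =====
-- stated objective: alternative
-- what changed: Replaces A's staged pipeline (collect imports, second categorize loop, three batch list.sort() calls, three hand-written conditional append blocks) by a single pass that inserts each import directly into sorted position in its bucket (online insertion), a loop over the bucket tuple to emit groups and blank lines, and a next()-over-generator scan for where the remaining content starts.
import Mathlib
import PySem

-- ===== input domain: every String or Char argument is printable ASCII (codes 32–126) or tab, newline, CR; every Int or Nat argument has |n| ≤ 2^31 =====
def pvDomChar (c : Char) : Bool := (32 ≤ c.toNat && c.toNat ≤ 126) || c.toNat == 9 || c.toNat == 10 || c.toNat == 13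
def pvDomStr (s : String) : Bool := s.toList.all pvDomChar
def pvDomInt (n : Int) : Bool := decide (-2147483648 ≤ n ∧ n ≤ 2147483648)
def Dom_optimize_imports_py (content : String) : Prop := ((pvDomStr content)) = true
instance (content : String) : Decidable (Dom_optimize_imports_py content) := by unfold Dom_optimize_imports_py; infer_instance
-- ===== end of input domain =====

-- B replaces A's staged pipeline (collect, categorize, three batch sorts, three conditional
-- append blocks) by one pass inserting each import into sorted position in its bucket and a
-- loop over the buckets that emits each group with its blank line. Objective: alternative.

-- ===== PORT A =====
-- the 'for i, line in enumerate(other_lines): … break' scan for non_import_start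
def pvFindStartA (i : Nat) : List String → Nat
  | [] => 0
  | l :: ls =>
    let s := PySem.Str.strip l
    if s ≠ "" ∧ PySem.Str.startswith s "//" = false ∧ PySem.Str.startswith s "/*" = false
    then i else pvFindStartA (i + 1) ls

def optimize_imports_py (content : String) : String :=
  -- content.split('\n'): sep ≠ "", so split? is always some
  let lines := (PySem.Str.split? content "\n").getD []
  let st := lines.foldl (fun (acc : List String × List String) line =>
      if PySem.Str.startswith (PySem.Str.strip line) "import " = true
      then (acc.1 ++ [PySem.Str.strip line], acc.2)
      else (acc.1, acc.2 ++ [line])) ([], [])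
  let import_lines := st.1
  let other_lines := st.2
  if import_lines = [] then content
  else
    let cat := import_lines.foldl
      (fun (acc : List String × List String × List String) il =>
        if PySem.Str.isIn "dart:" il = true then (acc.1 ++ [il], acc.2.1, acc.2.2)
        else if PySem.Str.isIn "package:" il = true then (acc.1, acc.2.1 ++ [il], acc.2.2)
        else (acc.1, acc.2.1, acc.2.2 ++ [il])) ([], [], [])
    let dart_imports := PySem.List.sorted cat.1 (fun s => s)
    let package_imports := PySem.List.sorted cat.2.1 (fun s => s)
    let relative_imports := PySem.List.sorted cat.2.2 (fun s => s)
    let o1 := if dart_imports ≠ [] then ([] ++ dart_imports) ++ [""] else []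
    let o2 := if package_imports ≠ [] then (o1 ++ package_imports) ++ [""] else o1
    let organized := if relative_imports ≠ [] then (o2 ++ relative_imports) ++ [""] else o2
    let non_import_start := pvFindStartA 0 other_lines
    PySem.Str.join "\n" (organized ++ PySem.List.slice other_lines (some (non_import_start : Int)))

-- ===== PORT B =====
-- the inner 'for i, x in enumerate(bucket): if s < x: bucket.insert(i, s); break / else: append'
def pvIns (s : String) : List String → List String
  | [] => [s]
  | x :: xs => if decide (s < x) then s :: x :: xs else x :: pvIns s xs

-- the 'next((i for i, line in enumerate(rest) if …), 0)' scan
def pvFindStartB (i : Nat) : List String → Nat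
  | [] => 0
  | l :: ls =>
    let s := PySem.Str.strip l
    if s ≠ "" ∧ PySem.Str.startswith s "//" = false ∧ PySem.Str.startswith s "/*" = false
    then i else pvFindStartB (i + 1) ls

def optimize_imports_py_alt (content : String) : String :=
  -- content.split('\n'): sep ≠ "", so split? is always some
  let st := ((PySem.Str.split? content "\n").getD []).foldl
    (fun (acc : (List String × List String × List String) × List String) line =>
      let s := PySem.Str.strip line
      if PySem.Str.startswith s "import " = true then
        -- bucket selection, then in-place sorted insertion into that bucket
        if PySem.Str.isIn "dart:" s = true then ((pvIns s acc.1.1, acc.1.2.1, acc.1.2.2), acc.2)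
        else if PySem.Str.isIn "package:" s = true then ((acc.1.1, pvIns s acc.1.2.1, acc.1.2.2), acc.2)
        else ((acc.1.1, acc.1.2.1, pvIns s acc.1.2.2), acc.2)
      else (acc.1, acc.2 ++ [line])) (([], [], []), [])
    let buckets := st.1
    let rest := st.2
    if buckets.1 = [] ∧ buckets.2.1 = [] ∧ buckets.2.2 = [] then content
    else
      let organized := [buckets.1, buckets.2.1, buckets.2.2].foldl
        (fun (acc : List String) b => if b ≠ [] then (acc ++ b) ++ [""] else acc) []
      let start := pvFindStartB 0 rest
      PySem.Str.join "\n" (organized ++ PySem.List.slice rest (some (start : Int)))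

-- ===== PRECONDITION & SPEC =====
def Spec_optimize_imports_py (content : String) (out : String) : Prop := out = optimize_imports_py_alt content
instance (content : String) (out : String) : Decidable (Spec_optimize_imports_py content out) := by unfold Spec_optimize_imports_py; infer_instance

-- ===== CLAIM (what is proved, stated in full; the proofs are below) =====
def Claim_equal_optimize_imports_py : Prop := ∀ (content : String), Dom_optimize_imports_py content → Spec_optimize_imports_py content (optimize_imports_py content)

-- ===== LEMMAS AND PROOFS =====

-- named predicates (definitionally the tests the ports perform)
def pvP (l : String) : Bool := PySem.Str.startswith (PySem.Str.strip l) "import "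
def pvQ0 (s : String) : Bool := PySem.Str.isIn "dart:" s
def pvQ1 (s : String) : Bool := PySem.Str.isIn "package:" s
def pvC1 (s : String) : Bool := !pvQ0 s && pvQ1 s
def pvC2 (s : String) : Bool := !pvQ0 s && !pvQ1 s

theorem pv_find_eq (ls : List String) : ∀ i, pvFindStartA i ls = pvFindStartB i ls := by
  induction ls with
  | nil => intro i; rfl
  | cons l t ih =>
      intro i
      simp only [pvFindStartA, pvFindStartB]
      split_ifs <;> simp [ih]

-- A's first loop computes (stripped import lines, other lines)
theorem pv_loopA1 (lines : List String) (a b : List String) :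
    lines.foldl (fun (acc : List String × List String) line =>
      if PySem.Str.startswith (PySem.Str.strip line) "import " = true
      then (acc.1 ++ [PySem.Str.strip line], acc.2)
      else (acc.1, acc.2 ++ [line])) (a, b) =
    (a ++ (lines.filter pvP).map PySem.Str.strip, b ++ lines.filter (fun l => !pvP l)) := by
  induction lines generalizing a b with
  | nil => simp
  | cons l t ih =>
      simp only [List.foldl_cons]
      by_cases h : PySem.Str.startswith (PySem.Str.strip l) "import " = true
      · rw [if_pos h, ih]
        have hp : pvP l = true := h
        simp [List.filter_cons, hp]
      · rw [if_neg h, ih]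
        have hp : pvP l = false := by
          cases hb : pvP l with
          | false => rfl
          | true => exact absurd hb h
        simp [List.filter_cons, hp]

-- A's categorize loop computes the three filters
theorem pv_loopA2 (il : List String) (a b c : List String) :
    il.foldl (fun (acc : List String × List String × List String) s =>
        if PySem.Str.isIn "dart:" s = true then (acc.1 ++ [s], acc.2.1, acc.2.2)
        else if PySem.Str.isIn "package:" s = true then (acc.1, acc.2.1 ++ [s], acc.2.2)
        else (acc.1, acc.2.1, acc.2.2 ++ [s])) (a, b, c) =
    (a ++ il.filter pvQ0, b ++ il.filter pvC1, c ++ il.filter pvC2) := by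
  induction il generalizing a b c with
  | nil => simp
  | cons s t ih =>
      simp only [List.foldl_cons]
      by_cases h0 : PySem.Str.isIn "dart:" s = true
      · rw [if_pos h0, ih]
        have hq0 : pvQ0 s = true := h0
        simp [List.filter_cons, hq0, pvC1, pvC2]
      · rw [if_neg h0]
        have hq0 : pvQ0 s = false := by
          cases hb : pvQ0 s with
          | false => rfl
          | true => exact absurd hb h0
        by_cases h1 : PySem.Str.isIn "package:" s = true
        · rw [if_pos h1, ih]
          have hq1 : pvQ1 s = true := h1
          simp [List.filter_cons, hq0, hq1, pvC1, pvC2]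
        · rw [if_neg h1, ih]
          have hq1 : pvQ1 s = false := by
            cases hb : pvQ1 s with
            | false => rfl
            | true => exact absurd hb h1
          simp [List.filter_cons, hq0, hq1, pvC1, pvC2]

-- B's hand-written insertion loop IS Python's stable sorted-insertion step
theorem pv_ins_eq (s : String) (g : List String) :
    pvIns s g = PySem.List.insertBy (fun a b => decide (a < b)) s g := by
  induction g with
  | nil => rfl
  | cons x xs ih => simp only [pvIns, PySem.List.insertBy, ih]

-- B's single pass computes the three incrementally sorted buckets and the rest
theorem pv_loopB (lines : List String) (a b c r : List String) :
    lines.foldl (fun (acc : (List String × List String × List String) × List String) line =>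
      let s := PySem.Str.strip line
      if PySem.Str.startswith s "import " = true then
        if PySem.Str.isIn "dart:" s = true then ((pvIns s acc.1.1, acc.1.2.1, acc.1.2.2), acc.2)
        else if PySem.Str.isIn "package:" s = true then ((acc.1.1, pvIns s acc.1.2.1, acc.1.2.2), acc.2)
        else ((acc.1.1, acc.1.2.1, pvIns s acc.1.2.2), acc.2)
      else (acc.1, acc.2 ++ [line])) ((a, b, c), r) =
    ((((((lines.filter pvP).map PySem.Str.strip).filter pvQ0).foldl (fun g s => pvIns s g) a),
      ((((lines.filter pvP).map PySem.Str.strip).filter pvC1).foldl (fun g s => pvIns s g) b),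
      ((((lines.filter pvP).map PySem.Str.strip).filter pvC2).foldl (fun g s => pvIns s g) c)),
     r ++ lines.filter (fun l => !pvP l)) := by
  induction lines generalizing a b c r with
  | nil => simp
  | cons l t ih =>
      simp only [List.foldl_cons]
      by_cases hp : PySem.Str.startswith (PySem.Str.strip l) "import " = true
      · have hP : pvP l = true := hp
        by_cases h0 : PySem.Str.isIn "dart:" (PySem.Str.strip l) = true
        · have hq0 : pvQ0 (PySem.Str.strip l) = true := h0
          simp only [hp, if_pos, h0, ite_true, ih]
          simp [List.filter_cons, hP, hq0, pvC1, pvC2]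
        · have hq0 : pvQ0 (PySem.Str.strip l) = false := by
            cases hb : pvQ0 (PySem.Str.strip l) with
            | false => rfl
            | true => exact absurd hb h0
          by_cases h1 : PySem.Str.isIn "package:" (PySem.Str.strip l) = true
          · have hq1 : pvQ1 (PySem.Str.strip l) = true := h1
            simp only [hp, ite_true, h0, ite_false, h1, ih]
            simp [List.filter_cons, hP, hq0, hq1, pvC1, pvC2]
          · have hq1 : pvQ1 (PySem.Str.strip l) = false := by
              cases hb : pvQ1 (PySem.Str.strip l) with
              | false => rfl
              | true => exact absurd hb h1
            simp only [hp, ite_true, h0, h1, ite_false, ih]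
            simp [List.filter_cons, hP, hq0, hq1, pvC1, pvC2]
      · have hP : pvP l = false := by
          cases hb : pvP l with
          | false => rfl
          | true => exact absurd hb hp
        simp only [hp, ite_false, ih]
        simp [List.filter_cons, hP]

-- a bucket built by online insertion IS the batch sort of its inputs
theorem pv_bucket (xs : List String) :
    xs.foldl (fun g s => pvIns s g) [] = PySem.List.sorted xs (fun s => s) := by
  rw [PySem.List.sorted_eq_foldl_insertBy xs (fun s => s)]
  congr 1
  funext g s
  exact pv_ins_eq s g

-- an import list is empty iff its three category filters are all empty
theorem pv_cats_nil (il : List String)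
    (h0 : il.filter pvQ0 = []) (h1 : il.filter pvC1 = []) (h2 : il.filter pvC2 = []) :
    il = [] := by
  cases il with
  | nil => rfl
  | cons x xs =>
      by_cases q0 : pvQ0 x = true <;> by_cases q1 : pvQ1 x = true <;>
        simp [List.filter_cons, q0, q1, pvC1, pvC2] at h0 h1 h2

theorem pv_main (content : String) :
    optimize_imports_py content = optimize_imports_py_alt content := by
  simp only [optimize_imports_py, optimize_imports_py_alt]
  rw [pv_loopA1, pv_loopB]
  simp only [List.nil_append]
  rw [pv_bucket, pv_bucket, pv_bucket]
  generalize hil0 : (((PySem.Str.split? content "\n").getD []).filter pvP).map PySem.Str.strip = il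
  generalize hol0 : ((PySem.Str.split? content "\n").getD []).filter (fun l => !pvP l) = ol
  by_cases hil : il = []
  · simp [hil, PySem.List.sorted_eq_nil_iff]
  · have hB : ¬((PySem.List.sorted (il.filter pvQ0) (fun s => s)) = [] ∧
        (PySem.List.sorted (il.filter pvC1) (fun s => s)) = [] ∧
        (PySem.List.sorted (il.filter pvC2) (fun s => s)) = []) := by
      rintro ⟨h0, h1, h2⟩
      rw [PySem.List.sorted_eq_nil_iff] at h0 h1 h2
      exact hil (pv_cats_nil il h0 h1 h2)
    rw [if_neg hil, if_neg hB, pv_loopA2]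
    simp only [List.nil_append, List.foldl_cons, List.foldl_nil]
    rw [pv_find_eq ol 0]

-- ===== VERDICT (by name: the statement is the Claim_ definition above) =====
theorem optimize_imports_py_spec : Claim_equal_optimize_imports_py := by
  intro content _
  unfold Spec_optimize_imports_py
  exact pv_main content
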